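-- pv_equiv track=rewrite | github.com/chlos/UC-San-Diego---Data-Structures-and-Algorithms-Specialization | course_04_strings/w01/trie_matching/trie_matching.py | solve
-- ===== SOURCE A (Python) =====
-- def build_trie(patterns):
--     tree = {0: {}}
--     id_counter = 0
--
--     for pattern in patterns:
--         curr_node_id = 0
--         for curr_char in pattern:
--
--             # check if node already exists
--             if curr_char in tree[curr_node_id]:
--                 curr_node_id = tree[curr_node_id][curr_char]
--                 continue
--
--             # new node
--             id_counter += 1
--             new_node_id = id_counter
--             tree[new_node_id] = {}
--             tree[curr_node_id][curr_char] = new_node_id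
--             curr_node_id = new_node_id
--
--     return tree
--
-- def solve(text, patterns):
--     result = []
--     trie = build_trie(patterns)
--
--     for i_start in range(len(text)):
--         i_curr = i_start
--         curr_char = text[i_curr]
--         curr_node_id = 0
--
--         while True:
--             # leaf
--             if not trie[curr_node_id]:
--                 result.append(i_start)
--                 break
--             # there is an edge with val == current char, let's move on
--             elif curr_char in trie[curr_node_id]:
--                 curr_node_id = trie[curr_node_id][curr_char]
--                 i_curr += 1
--                 curr_char = text[i_curr] if i_curr < len(text) else None
--             # no pattern for this subtext
--             else:
--                 break
--
--     return result
-- ===== SOURCE B (Python) =====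
-- def solve(text, patterns):
--     # A trie walk can only stop (and report a match) at a leaf, i.e. at a pattern
--     # that no other pattern strictly extends; with no nonempty pattern the root
--     # itself is a leaf and every position matches.
--     prefixes = {q[:j] for q in patterns for j in range(len(q))}
--     maximal = {p for p in patterns if p and p not in prefixes}
--     if not maximal:
--         return list(range(len(text)))
--     maxlen = max(map(len, maximal))
--     return [i for i in range(len(text))
--             if any(text[i:i+l] in maximal for l in range(1, maxlen + 1))]
-- ===== Notes on version B (the rewrite author's own statement) =====
-- stated objective: alternative
-- what changed: Replaces the dict-of-dicts trie construction plus per-position node-by-node trie walk by hashing: a set of all proper pattern prefixes yields the 'maximal' patterns (exactly the trie's leaf words), and each text position is reported iff one of its prefixes up to the maximal pattern length is in that set (all positions when no nonempty pattern exists, matching the root-is-leaf case); trades the trie for two set comprehensions and per-position hash lookups.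
import Mathlib
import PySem

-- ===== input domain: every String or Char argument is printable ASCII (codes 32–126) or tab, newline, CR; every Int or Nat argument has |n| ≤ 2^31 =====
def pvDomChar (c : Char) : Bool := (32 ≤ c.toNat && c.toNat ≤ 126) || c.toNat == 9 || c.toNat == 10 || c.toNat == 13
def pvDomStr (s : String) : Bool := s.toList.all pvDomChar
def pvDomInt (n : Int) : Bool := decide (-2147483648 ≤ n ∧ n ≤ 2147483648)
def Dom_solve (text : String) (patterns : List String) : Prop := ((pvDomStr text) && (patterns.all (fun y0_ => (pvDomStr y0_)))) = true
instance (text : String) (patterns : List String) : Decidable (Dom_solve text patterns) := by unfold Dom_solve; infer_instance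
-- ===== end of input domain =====

-- B replaces A's dict-of-dicts trie + per-position walk by a direct scan against the
-- "maximal" patterns (the trie's leaf words); objective: simpler, same worst-case cost.

-- ===== PORT A =====
-- A's trie is a dict node-id -> (dict char -> node-id); ported as PySem.Dict.
abbrev PvTrie := PySem.Dict Int (PySem.Dict Char Int)

-- body of A's inner 'for curr_char in pattern' loop (tree[curr_node_id] is always a
-- present key, so getD with an empty default is exact where Python indexes)
def trieAddChar (tree : PvTrie) (cnt : Int) (cur : Int) (c : Char) : PvTrie × Int × Int :=
  match (tree.getD cur PySem.Dict.empty).get? c with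
  | some j => (tree, cnt, j)
  | none =>
      let newId := cnt + 1
      let t1 := tree.insert newId PySem.Dict.empty
      (t1.insert cur ((t1.getD cur PySem.Dict.empty).insert c newId), newId, newId)

def trieAddPattern (tree : PvTrie) (cnt : Int) (p : List Char) : PvTrie × Int :=
  let r := p.foldl (fun st c => trieAddChar st.1 st.2.1 st.2.2 c) (tree, cnt, 0)
  (r.1, r.2.1)

-- build_trie: tree = {0: {}}, id_counter = 0, then the pattern loop
def buildTrie (patterns : List String) : PvTrie :=
  (patterns.foldl (fun st p => trieAddPattern st.1 st.2 p.toList)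
    (PySem.Dict.empty.insert 0 PySem.Dict.empty, 0)).1

-- A's 'while True' walk from position i_start, ported as structural recursion on the
-- remaining characters text[i_curr:] (each non-breaking iteration advances i_curr by 1;
-- curr_char = None at the end of the text is the [] case)
def walkA (trie : PvTrie) (node : Int) (cs : List Char) : Bool :=
  let d := trie.getD node PySem.Dict.empty
  if d.items.isEmpty then true            -- leaf: report a match
  else match cs with
    | [] => false                          -- curr_char is None: no edge, break
    | c :: rest =>
        match d.get? c with
        | some j => walkA trie j rest      -- follow the edge, i_curr += 1
        | none => false                    -- no edge, break

def solve (text : String) (patterns : List String) : List Int :=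
  let trie := buildTrie patterns
  (PySem.List.pyRange 0 (PySem.Str.len text) 1).foldl
    (fun result i => if walkA trie 0 (text.toList.drop i.toNat) then result ++ [i] else result) []

-- ===== PORT B =====
-- prefixes = {q[:j] for q in patterns for j in range(len(q))}   (a Python set)
def properPrefixes (patterns : List String) : PySem.Set (List Char) :=
  PySem.Set.ofList (patterns.flatMap (fun q =>
    (PySem.List.pyRange 0 (PySem.Str.len q) 1).map (fun j => q.toList.take j.toNat)))

-- maximal = {p for p in patterns if p and p not in prefixes}
def maximalSet (patterns : List String) : PySem.Set (List Char) :=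
  PySem.Set.ofList ((patterns.filter (fun p =>
    !p.toList.isEmpty && !(PySem.Set.contains (properPrefixes patterns) p.toList))).map String.toList)

-- text[i:i+l] for 0 ≤ i is exactly (text[i:]).take l; 'in maximal' is set membership
def solve_alt (text : String) (patterns : List String) : List Int :=
  let maximal := maximalSet patterns
  if maximal.isEmpty then PySem.List.pyRange 0 (PySem.Str.len text) 1
  else
    match PySem.List.max? (maximal.map (fun u => (u.length : Int))) (fun x => x) with
    | none => []   -- unreachable: maximal is nonempty in this branch
    | some maxlen =>
        (PySem.List.pyRange 0 (PySem.Str.len text) 1).filter (fun i =>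
          (PySem.List.pyRange 1 (maxlen + 1) 1).any (fun l =>
            PySem.Set.contains maximal ((text.toList.drop i.toNat).take l.toNat)))

-- ===== PRECONDITION & SPEC =====
def Spec_solve (text : String) (patterns : List String) (out : List Int) : Prop := out = solve_alt text patterns
instance (text : String) (patterns : List String) (out : List Int) : Decidable (Spec_solve text patterns out) := by unfold Spec_solve; infer_instance

-- ===== CLAIM (what is proved, stated in full; the proofs are below) =====
def Claim_equal_solve : Prop := ∀ (text : String) (patterns : List String), Dom_solve text patterns → Spec_solve text patterns (solve text patterns)

-- ===== LEMMAS AND PROOFS =====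

-- following one edge, and a whole string of edges from the root (node 0)
def pvFollow (t : PvTrie) (i : Int) (c : Char) : Option Int :=
  (t.get? i).bind (fun d => d.get? c)

def pvReach (t : PvTrie) (s : List Char) : Option Int :=
  s.foldl (fun o c => o.bind (fun i => pvFollow t i c)) (some 0)

def PvReached (t : PvTrie) (s : List Char) : Prop := (pvReach t s).isSome

-- trie well-formedness: reached ids are present keys bounded by the counter, the
-- string reaching a node is unique, and every key is bounded by the counter
def PvInv (t : PvTrie) (cnt : Int) : Prop :=
  (∀ s id, pvReach t s = some id → t.contains id = true ∧ 0 ≤ id ∧ id ≤ cnt) ∧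
  (∀ s u id, pvReach t s = some id → pvReach t u = some id → s = u) ∧
  (∀ id, t.contains id = true → id ≤ cnt)

lemma pvReach_nil (t : PvTrie) : pvReach t [] = some 0 := rfl

lemma pvFoldl_none (t : PvTrie) (r : List Char) :
    r.foldl (fun o c => o.bind (fun i => pvFollow t i c)) none = none := by
  induction r with
  | nil => rfl
  | cons c r ih => simpa using ih

lemma pvReach_snoc (t : PvTrie) (s : List Char) (c : Char) :
    pvReach t (s ++ [c]) = (pvReach t s).bind (fun i => pvFollow t i c) := by
  simp [pvReach, List.foldl_append]

lemma pvReach_append_none (t : PvTrie) (s r : List Char) (h : pvReach t s = none) :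
    pvReach t (s ++ r) = none := by
  simp [pvReach, List.foldl_append] at *
  rw [h]; exact pvFoldl_none t r

-- the tree produced by the no-edge branch of trieAddChar
def pvStep (t : PvTrie) (cnt cur : Int) (c : Char) : PvTrie :=
  let t1 := t.insert (cnt + 1) PySem.Dict.empty
  t1.insert cur ((t1.getD cur PySem.Dict.empty).insert c (cnt + 1))

-- the no-edge branch of trieAddChar: full characterisation of reach in the new tree
lemma pvStep_reach (t : PvTrie) (cnt cur : Int) (c : Char) (q : List Char)
    (d : PySem.Dict Char Int)
    (hI : PvInv t cnt) (hq : pvReach t q = some cur)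
    (hd : t.get? cur = some d) (hno : d.get? c = none) :
    ∀ s, pvReach (pvStep t cnt cur c) s =
      if s = q ++ [c] then some (cnt + 1)
      else if q ++ [c] <+: s then none
      else pvReach t s := by
  obtain ⟨hI1, hI2, hI3⟩ := hI
  obtain ⟨-, hcur0, hcurle⟩ := hI1 q cur hq
  have hne : cur ≠ cnt + 1 := by omega
  have ht2cur : (pvStep t cnt cur c).get? cur = some (d.insert c (cnt + 1)) := by
    have h1 : (t.insert (cnt + 1) PySem.Dict.empty).get? cur = some d := by
      rw [PySem.Dict.get?_insert_of_ne _ _ hne, hd]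
    simp [pvStep, PySem.Dict.getD_of_get?_eq_some _ _ h1, PySem.Dict.get?_insert_self]
  have ht2new : (pvStep t cnt cur c).get? (cnt + 1) = some PySem.Dict.empty := by
    rw [pvStep, PySem.Dict.get?_insert_of_ne _ _ (Ne.symm hne), PySem.Dict.get?_insert_self]
  have ht2other : ∀ i, i ≠ cur → i ≠ cnt + 1 → (pvStep t cnt cur c).get? i = t.get? i := by
    intro i h1 h2
    rw [pvStep, PySem.Dict.get?_insert_of_ne _ _ h1, PySem.Dict.get?_insert_of_ne _ _ h2]
  have fnew : ∀ c', pvFollow (pvStep t cnt cur c) (cnt + 1) c' = none := by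
    intro c'; simp [pvFollow, ht2new, PySem.Dict.get?_empty]
  have fcur : ∀ c', pvFollow (pvStep t cnt cur c) cur c' =
      if c' = c then some (cnt + 1) else pvFollow t cur c' := by
    intro c'; simp [pvFollow, ht2cur, hd, PySem.Dict.get?_insert]
  have fother : ∀ i c', i ≠ cur → i ≠ cnt + 1 →
      pvFollow (pvStep t cnt cur c) i c' = pvFollow t i c' := by
    intro i c' h1 h2; simp [pvFollow, ht2other i h1 h2]
  intro s
  induction s using List.reverseRecOn with
  | nil =>
      have h1 : ([] : List Char) ≠ q ++ [c] := by simp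
      have h2 : ¬ (q ++ [c] <+: ([] : List Char)) := by
        intro h; have := h.length_le; simp at this
      rw [if_neg h1, if_neg h2]
      rfl
  | append_singleton s c' ih =>
      rw [pvReach_snoc, ih]
      by_cases hs : s = q ++ [c]
      · subst hs
        rw [if_pos rfl]
        have h1 : q ++ [c] ++ [c'] ≠ q ++ [c] := by
          intro h; have := congrArg List.length h; simp at this
        have h2 : q ++ [c] <+: q ++ [c] ++ [c'] := List.prefix_append _ _
        rw [if_neg h1, if_pos h2]
        simp [fnew]
      · by_cases hp : q ++ [c] <+: s
        · rw [if_neg hs, if_pos hp]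
          have h1 : s ++ [c'] ≠ q ++ [c] := by
            intro h
            have hl := hp.length_le
            have hlen := congrArg List.length h
            simp at hl hlen; omega
          have h2 : q ++ [c] <+: s ++ [c'] := hp.trans (List.prefix_append _ _)
          rw [if_neg h1, if_pos h2]
          rfl
        · rw [if_neg hs, if_neg hp]
          have hpre : (q ++ [c] <+: s ++ [c']) ↔ (s ++ [c'] = q ++ [c] ∨ q ++ [c] <+: s) :=
            List.prefix_concat_iff.trans (by constructor <;> rintro (h | h) <;>
              first | exact Or.inl h.symm | exact Or.inr h)
          have hsplit : s ++ [c'] = q ++ [c] → s = q ∧ c' = c := by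
            intro h
            have := List.append_inj' h rfl
            exact ⟨this.1, by simpa using this.2⟩
          cases hr : pvReach t s with
          | none =>
              have h1 : s ++ [c'] ≠ q ++ [c] := by
                intro h; obtain ⟨h', -⟩ := hsplit h; subst h'
                rw [hq] at hr; simp at hr
              have h2 : ¬ (q ++ [c] <+: s ++ [c']) := by
                rw [hpre]; rintro (h | h); exact h1 h; exact hp h
              rw [if_neg h1, if_neg h2, pvReach_snoc, hr]
              rfl
          | some i =>
              by_cases hicur : i = cur
              · subst hicur
                have hsq : s = q := hI2 s q i hr hq
                subst hsq
                by_cases hc : c' = c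
                · subst hc
                  rw [if_pos rfl]
                  simp [fcur]
                · have h1 : s ++ [c'] ≠ s ++ [c] := by
                    intro h; exact hc (by simpa using (List.append_inj' h rfl).2)
                  have h2 : ¬ (s ++ [c] <+: s ++ [c']) := by
                    intro h
                    have := (List.prefix_append_right_inj s).mp h
                    rcases this with ⟨u, hu⟩
                    cases u with
                    | nil => simp at hu; exact hc hu.symm
                    | cons a u => simp at hu
                  rw [if_neg h1, if_neg h2, pvReach_snoc, hr]
                  simp [fcur, hc]
              · have hile : i ≤ cnt := (hI1 s i hr).2.2
                have h1 : s ++ [c'] ≠ q ++ [c] := by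
                  intro h; obtain ⟨h', -⟩ := hsplit h; subst h'
                  rw [hq] at hr
                  exact hicur (Option.some.inj hr).symm
                have h2 : ¬ (q ++ [c] <+: s ++ [c']) := by
                  rw [hpre]; rintro (h | h); exact h1 h; exact hp h
                rw [if_neg h1, if_neg h2, pvReach_snoc, hr]
                simp only [Option.bind_some]
                exact fother i c' hicur (by omega)

lemma pvAddChar_spec (t : PvTrie) (cnt cur : Int) (c : Char) (q : List Char)
    (hI : PvInv t cnt) (hq : pvReach t q = some cur) :
    PvInv (trieAddChar t cnt cur c).1 (trieAddChar t cnt cur c).2.1 ∧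
    cnt ≤ (trieAddChar t cnt cur c).2.1 ∧
    pvReach (trieAddChar t cnt cur c).1 (q ++ [c]) = some (trieAddChar t cnt cur c).2.2 ∧
    (∀ s, PvReached (trieAddChar t cnt cur c).1 s ↔ PvReached t s ∨ s = q ++ [c]) := by
  obtain ⟨hcc, hcur0, hcurle⟩ := hI.1 q cur hq
  obtain ⟨d, hd⟩ : ∃ d, t.get? cur = some d := by
    rw [PySem.Dict.contains_eq_isSome_get?] at hcc
    exact Option.isSome_iff_exists.mp hcc
  have hgetD : t.getD cur PySem.Dict.empty = d := PySem.Dict.getD_of_get?_eq_some _ _ hd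
  cases hedge : d.get? c with
  | some j =>
      have hres : trieAddChar t cnt cur c = (t, cnt, j) := by
        simp [trieAddChar, hgetD, hedge]
      rw [hres]
      have hqc : pvReach t (q ++ [c]) = some j := by
        rw [pvReach_snoc, hq]
        simp [pvFollow, hd, hedge]
      refine ⟨hI, le_refl _, hqc, fun s => ?_⟩
      constructor
      · exact Or.inl
      · rintro (h | rfl)
        · exact h
        · rw [PvReached, hqc]; rfl
  | none =>
      have hres : trieAddChar t cnt cur c = (pvStep t cnt cur c, cnt + 1, cnt + 1) := by
        simp [trieAddChar, hgetD, hedge, pvStep]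
      rw [hres]
      dsimp only
      have C := pvStep_reach t cnt cur c q d hI hq hd hedge
      obtain ⟨hI1, hI2, hI3⟩ := hI
      have hreach_ext_none : ∀ s, q ++ [c] <+: s → s ≠ q ++ [c] → pvReach t s = none := by
        intro s hpre hne
        obtain ⟨r, hr⟩ := hpre
        have hqc : pvReach t (q ++ [c]) = none := by
          rw [pvReach_snoc, hq]
          simp [pvFollow, hd, hedge]
        rw [← hr]
        exact pvReach_append_none t _ r hqc
      have hcontains : ∀ id, t.contains id = true → (pvStep t cnt cur c).contains id = true := by
        intro id h
        simp [pvStep, PySem.Dict.contains_insert, h]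
      have hback : ∀ s id, pvReach (pvStep t cnt cur c) s = some id →
          (s = q ++ [c] ∧ id = cnt + 1) ∨ pvReach t s = some id := by
        intro s id h
        rw [C s] at h
        split_ifs at h with h1 h2
        · exact Or.inl ⟨h1, (Option.some.inj h).symm⟩
        · exact Or.inr h
      refine ⟨⟨?_, ?_, ?_⟩, by omega, ?_, ?_⟩
      · intro s id h
        rcases hback s id h with ⟨rfl, rfl⟩ | h'
        · refine ⟨?_, by omega, by omega⟩
          simp [pvStep, PySem.Dict.contains_insert]
        · obtain ⟨hc', h0, hle⟩ := hI1 s id h'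
          exact ⟨hcontains id hc', h0, by omega⟩
      · intro s u id hs hu
        rcases hback s id hs with ⟨rfl, rfl⟩ | hs'
        · rcases hback u (cnt + 1) hu with ⟨rfl, -⟩ | hu'
          · rfl
          · exact absurd (hI1 u _ hu').2.2 (by omega)
        · rcases hback u id hu with ⟨rfl, rfl⟩ | hu'
          · exact absurd (hI1 s _ hs').2.2 (by omega)
          · exact hI2 s u id hs' hu'
      · intro id h
        simp only [pvStep, PySem.Dict.contains_insert] at h
        rcases Bool.or_eq_true_iff.mp h with h | h
        · have : id = cur := by simpa using h
          omega
        · rcases Bool.or_eq_true_iff.mp h with h | h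
          · have : id = cnt + 1 := by simpa using h
            omega
          · exact le_trans (hI3 id h) (by omega)
      · rw [C (q ++ [c]), if_pos rfl]
      · intro s
        rw [PvReached, C s]
        split_ifs with h1 h2
        · simp [h1]
        · simp only [Option.isSome_none, Bool.false_eq_true, false_iff]
          push Not
          refine ⟨?_, h1⟩
          rw [PvReached, hreach_ext_none s h2 h1]
          simp
        · rw [PvReached]
          constructor
          · exact Or.inl
          · rintro (h | rfl)
            · exact h
            · exact absurd rfl h1

lemma pvAddPat_spec (p : List Char) (t : PvTrie) (cnt cur : Int) (q : List Char)
    (hI : PvInv t cnt) (hq : pvReach t q = some cur) :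
    PvInv (p.foldl (fun st c => trieAddChar st.1 st.2.1 st.2.2 c) (t, cnt, cur)).1
          (p.foldl (fun st c => trieAddChar st.1 st.2.1 st.2.2 c) (t, cnt, cur)).2.1 ∧
    (∀ s, PvReached (p.foldl (fun st c => trieAddChar st.1 st.2.1 st.2.2 c) (t, cnt, cur)).1 s ↔
      PvReached t s ∨ (q <+: s ∧ s <+: q ++ p)) := by
  induction p generalizing t cnt cur q with
  | nil =>
      refine ⟨hI, fun s => ?_⟩
      simp only [List.foldl_nil, List.append_nil]
      constructor
      · exact Or.inl
      · rintro (h | ⟨h1, h2⟩)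
        · exact h
        · have : s = q := h2.eq_of_length_le h1.length_le
          subst this
          rw [PvReached, hq]; rfl
  | cons c p' ih =>
      obtain ⟨hI', hcnt', hreach', hchar'⟩ := pvAddChar_spec t cnt cur c q hI hq
      rw [List.foldl_cons]
      obtain ⟨hIfin, hcharfin⟩ := ih (trieAddChar t cnt cur c).1 (trieAddChar t cnt cur c).2.1
        (trieAddChar t cnt cur c).2.2 (q ++ [c]) hI' hreach'
      refine ⟨hIfin, fun s => ?_⟩
      rw [hcharfin s, hchar' s]
      have happ : q ++ [c] ++ p' = q ++ (c :: p') := by simp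
      rw [happ]
      constructor
      · rintro ((h | rfl) | ⟨h1, h2⟩)
        · exact Or.inl h
        · exact Or.inr ⟨List.prefix_append _ _, by
            refine ⟨p', by simp⟩⟩
        · exact Or.inr ⟨(List.prefix_append q [c]).trans h1, h2⟩
      · rintro (h | ⟨h1, h2⟩)
        · exact Or.inl (Or.inl h)
        · obtain ⟨x, rfl⟩ := h1
          have hx : x <+: c :: p' := (List.prefix_append_right_inj q).mp h2
          cases x with
          | nil =>
              refine Or.inl (Or.inl ?_)
              rw [List.append_nil, PvReached, hq]; rfl
          | cons a y =>
              rw [List.cons_prefix_cons] at hx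
              obtain ⟨rfl, hy⟩ := hx
              refine Or.inr ⟨⟨y, by simp⟩, ?_⟩
              rw [show q ++ a :: y = (q ++ [a]) ++ y by simp,
                  show q ++ a :: p' = (q ++ [a]) ++ p' by simp]
              exact (List.prefix_append_right_inj (q ++ [a])).mpr hy

lemma pvInit_reach (s : List Char) :
    pvReach (PySem.Dict.empty.insert 0 PySem.Dict.empty) s =
      if s = [] then some 0 else none := by
  cases s with
  | nil => rfl
  | cons c s' =>
      rw [if_neg (by simp)]
      have h0 : pvFollow (PySem.Dict.empty.insert 0 PySem.Dict.empty) 0 c = none := by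
        simp [pvFollow, PySem.Dict.get?_insert_self, PySem.Dict.get?_empty]
      show List.foldl _ ((some 0).bind fun i => pvFollow _ i c) s' = none
      rw [Option.bind_some, h0]
      exact pvFoldl_none _ s'

lemma pvInit_inv : PvInv (PySem.Dict.empty.insert 0 PySem.Dict.empty) 0 := by
  refine ⟨?_, ?_, ?_⟩
  · intro s id h
    rw [pvInit_reach s] at h
    split_ifs at h with h1
    · cases h
      refine ⟨?_, le_refl _, le_refl _⟩
      simp
  · intro s u id hs hu
    rw [pvInit_reach s] at hs
    rw [pvInit_reach u] at hu
    split_ifs at hs with h1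
    split_ifs at hu with h2
    rw [h1, h2]
  · intro id h
    simp only [PySem.Dict.contains_insert, PySem.Dict.contains_empty] at h
    have : id = 0 := by simpa using h
    omega

lemma pvBuildLoop (ps : List String) (t : PvTrie) (cnt : Int) (hI : PvInv t cnt) :
    PvInv (ps.foldl (fun st p => trieAddPattern st.1 st.2 p.toList) (t, cnt)).1
          (ps.foldl (fun st p => trieAddPattern st.1 st.2 p.toList) (t, cnt)).2 ∧
    (∀ s, PvReached (ps.foldl (fun st p => trieAddPattern st.1 st.2 p.toList) (t, cnt)).1 s ↔
      PvReached t s ∨ ∃ p ∈ ps, s <+: p.toList) := by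
  induction ps generalizing t cnt with
  | nil => exact ⟨hI, fun s => by simp⟩
  | cons p ps' ih =>
      rw [List.foldl_cons]
      obtain ⟨hI', hchar'⟩ := pvAddPat_spec p.toList t cnt 0 [] hI (pvReach_nil t)
      have hpair : trieAddPattern t cnt p.toList =
          ((p.toList.foldl (fun st c => trieAddChar st.1 st.2.1 st.2.2 c) (t, cnt, 0)).1,
           (p.toList.foldl (fun st c => trieAddChar st.1 st.2.1 st.2.2 c) (t, cnt, 0)).2.1) := rfl
      obtain ⟨hIfin, hcharfin⟩ := ih (trieAddPattern t cnt p.toList).1 (trieAddPattern t cnt p.toList).2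
        (by rw [hpair]; exact hI')
      refine ⟨hIfin, fun s => ?_⟩
      rw [hcharfin s]
      have : PvReached (trieAddPattern t cnt p.toList).1 s ↔ PvReached t s ∨ s <+: p.toList := by
        rw [hpair]
        rw [hchar' s]
        simp [List.nil_prefix]
      rw [this]
      simp only [List.mem_cons]
      constructor
      · rintro ((h | h) | ⟨p', hp', hs⟩)
        · exact Or.inl h
        · exact Or.inr ⟨p, Or.inl rfl, h⟩
        · exact Or.inr ⟨p', Or.inr hp', hs⟩
      · rintro (h | ⟨p', hp' | hp', hs⟩)
        · exact Or.inl (Or.inl h)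
        · exact Or.inl (Or.inr (by rw [hp'] at hs; exact hs))
        · exact Or.inr ⟨p', hp', hs⟩

lemma pvBuild_spec (patterns : List String) :
    (∃ cnt, PvInv (buildTrie patterns) cnt) ∧
    (∀ s, PvReached (buildTrie patterns) s ↔ s = [] ∨ ∃ p ∈ patterns, s <+: p.toList) := by
  obtain ⟨hI, hchar⟩ := pvBuildLoop patterns (PySem.Dict.empty.insert 0 PySem.Dict.empty) 0 pvInit_inv
  refine ⟨⟨_, hI⟩, fun s => ?_⟩
  rw [buildTrie, hchar s]
  have : PvReached (PySem.Dict.empty.insert 0 PySem.Dict.empty) s ↔ s = [] := by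
    rw [PvReached, pvInit_reach s]
    split_ifs with h <;> simp [h]
  rw [this]

def PvIsLeafStr (t : PvTrie) (u : List Char) : Prop :=
  PvReached t u ∧ ∀ c, ¬ PvReached t (u ++ [c])

lemma pvReached_of_append (t : PvTrie) (u v : List Char) (h : PvReached t (u ++ v)) :
    PvReached t u := by
  rw [PvReached] at h ⊢
  by_contra hc
  have : pvReach t u = none := by
    cases hh : pvReach t u
    · rfl
    · rw [hh] at hc; simp at hc
  rw [pvReach_append_none t u v this] at h
  simp at h

lemma pvItems_empty_iff (d : PySem.Dict Char Int) :
    d.items.isEmpty = true ↔ ∀ c, d.get? c = none := by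
  cases d with
  | mk l =>
    cases l with
    | nil =>
        simp only [List.isEmpty_nil, true_iff]
        intro c; rfl
    | cons p r =>
        simp only [List.isEmpty_cons, Bool.false_eq_true, false_iff]
        push Not
        exact ⟨p.1, by rw [PySem.Dict.get?_mk_cons]; simp⟩

lemma pvWalk_spec (t : PvTrie) (cnt : Int) (hI : PvInv t cnt) :
    ∀ (cs s : List Char) (id : Int), pvReach t s = some id →
      (walkA t id cs = true ↔ ∃ k ≤ cs.length, PvIsLeafStr t (s ++ cs.take k)) := by
  intro cs
  induction cs with
  | nil =>
      intro s id hr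
      obtain ⟨hcc, -, -⟩ := hI.1 s id hr
      obtain ⟨d, hd⟩ : ∃ d, t.get? id = some d := by
        rw [PySem.Dict.contains_eq_isSome_get?] at hcc
        exact Option.isSome_iff_exists.mp hcc
      have hgetD : t.getD id PySem.Dict.empty = d := PySem.Dict.getD_of_get?_eq_some _ _ hd
      have hext : ∀ c, pvReach t (s ++ [c]) = d.get? c := by
        intro c; rw [pvReach_snoc, hr]; simp [pvFollow, hd]
      rw [walkA, hgetD]
      by_cases hleaf : d.items.isEmpty = true
      · rw [if_pos hleaf]
        simp only [true_iff]
        refine ⟨0, by omega, ⟨by simp [PvReached, hr], ?_⟩⟩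
        intro c hc
        rw [List.take_nil, List.append_nil] at hc
        rw [PvReached, hext c, (pvItems_empty_iff d).mp hleaf c] at hc
        simp at hc
      · rw [if_neg hleaf]
        simp only [Bool.false_eq_true, false_iff]
        rintro ⟨k, hk, hReached, hnoext⟩
        rw [pvItems_empty_iff] at hleaf
        push Not at hleaf
        obtain ⟨c0, hc0⟩ := hleaf
        obtain ⟨j0, hj0⟩ : ∃ j0, d.get? c0 = some j0 := by
          cases hh : d.get? c0
          · exact absurd hh hc0
          · exact ⟨_, rfl⟩
        have hkz : k = 0 := Nat.le_zero.mp (by simpa using hk)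
        subst hkz
        rw [List.take_nil, List.append_nil] at hnoext
        exact hnoext c0 (by rw [PvReached, hext c0, hj0]; rfl)
  | cons c rest ih =>
      intro s id hr
      obtain ⟨hcc, -, -⟩ := hI.1 s id hr
      obtain ⟨d, hd⟩ : ∃ d, t.get? id = some d := by
        rw [PySem.Dict.contains_eq_isSome_get?] at hcc
        exact Option.isSome_iff_exists.mp hcc
      have hgetD : t.getD id PySem.Dict.empty = d := PySem.Dict.getD_of_get?_eq_some _ _ hd
      have hext : ∀ c', pvReach t (s ++ [c']) = d.get? c' := by
        intro c'; rw [pvReach_snoc, hr]; simp [pvFollow, hd]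
      rw [walkA, hgetD]
      by_cases hleaf : d.items.isEmpty = true
      · rw [if_pos hleaf]
        simp only [true_iff]
        refine ⟨0, by omega, ⟨by simp [PvReached, hr], ?_⟩⟩
        intro c' hc'
        rw [List.take_zero, List.append_nil] at hc'
        rw [PvReached, hext c', (pvItems_empty_iff d).mp hleaf c'] at hc'
        simp at hc'
      · rw [if_neg hleaf]
        have hnotleaf : ¬ PvIsLeafStr t s := by
          rw [pvItems_empty_iff] at hleaf
          push Not at hleaf
          obtain ⟨c0, hc0⟩ := hleaf
          obtain ⟨j0, hj0⟩ : ∃ j0, d.get? c0 = some j0 := by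
            cases hh : d.get? c0
            · exact absurd hh hc0
            · exact ⟨_, rfl⟩
          rintro ⟨-, hnoext⟩
          exact hnoext c0 (by rw [PvReached, hext c0, hj0]; rfl)
        cases hedge : d.get? c with
        | some j =>
            have hrj : pvReach t (s ++ [c]) = some j := by rw [hext c, hedge]
            rw [ih (s ++ [c]) j hrj]
            constructor
            · rintro ⟨k, hk, hleafk⟩
              refine ⟨k + 1, by simpa using hk, ?_⟩
              rw [List.take_succ_cons, show s ++ c :: List.take k rest = (s ++ [c]) ++ List.take k rest by simp]
              exact hleafk
            · rintro ⟨k, hk, hleafk⟩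
              cases k with
              | zero =>
                  rw [List.take_zero, List.append_nil] at hleafk
                  exact absurd hleafk hnotleaf
              | succ k' =>
                  refine ⟨k', by simpa using hk, ?_⟩
                  rw [List.take_succ_cons, show s ++ c :: List.take k' rest = (s ++ [c]) ++ List.take k' rest by simp] at hleafk
                  exact hleafk
        | none =>
            simp only [Bool.false_eq_true, false_iff]
            rintro ⟨k, hk, hReached, hnoext⟩
            cases k with
            | zero =>
                rw [List.take_zero, List.append_nil] at hReached hnoext
                exact hnotleaf ⟨hReached, hnoext⟩
            | succ k' =>
                rw [List.take_succ_cons, show s ++ c :: List.take k' rest = (s ++ [c]) ++ List.take k' rest by simp] at hReached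
                have := pvReached_of_append t (s ++ [c]) _ hReached
                rw [PvReached, hext c, hedge] at this
                simp at this

lemma pvProperPrefixes_mem (patterns : List String) (u : List Char) :
    u ∈ properPrefixes patterns ↔
      ∃ q ∈ patterns, u <+: q.toList ∧ u.length < q.toList.length := by
  rw [properPrefixes, PySem.Set.mem_ofList, List.mem_flatMap]
  constructor
  · rintro ⟨q, hq, hu⟩
    rw [List.mem_map] at hu
    obtain ⟨j, hj, rfl⟩ := hu
    rw [PySem.List.mem_pyRange_one] at hj
    obtain ⟨hj0, hjlt⟩ := hj
    rw [PySem.Str.len_eq] at hjlt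
    have hjn : j.toNat < q.toList.length := by omega
    refine ⟨q, hq, List.take_prefix _ _, ?_⟩
    rw [List.length_take]
    omega
  · rintro ⟨q, hq, hpre, hlen⟩
    refine ⟨q, hq, ?_⟩
    rw [List.mem_map]
    refine ⟨(u.length : Int), ?_, ?_⟩
    · rw [PySem.List.mem_pyRange_one, PySem.Str.len_eq]
      omega
    · rw [Int.toNat_natCast]
      exact (List.prefix_iff_eq_take.mp hpre).symm

lemma pvMaximal_mem (patterns : List String) (u : List Char) :
    u ∈ maximalSet patterns ↔ (∃ p ∈ patterns, p.toList = u) ∧ u ≠ [] ∧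
      ¬∃ q ∈ patterns, u.length < q.toList.length ∧ u <+: q.toList := by
  rw [maximalSet, PySem.Set.mem_ofList, List.mem_map]
  constructor
  · rintro ⟨p, hp, rfl⟩
    rw [List.mem_filter] at hp
    obtain ⟨hppat, hpb⟩ := hp
    simp only [Bool.and_eq_true, Bool.not_eq_true'] at hpb
    obtain ⟨hpne, hpnpre⟩ := hpb
    refine ⟨⟨p, hppat, rfl⟩, by simpa using hpne, ?_⟩
    rintro ⟨q, hq, hlen, hpre⟩
    rw [← Bool.not_eq_true, PySem.Set.contains_iff, pvProperPrefixes_mem] at hpnpre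
    exact hpnpre ⟨q, hq, hpre, hlen⟩
  · rintro ⟨⟨p, hp, rfl⟩, hne, hmax⟩
    refine ⟨p, ?_, rfl⟩
    rw [List.mem_filter]
    refine ⟨hp, ?_⟩
    simp only [Bool.and_eq_true, Bool.not_eq_true']
    refine ⟨by simpa using hne, ?_⟩
    rw [← Bool.not_eq_true, PySem.Set.contains_iff, pvProperPrefixes_mem]
    rintro ⟨q, hq, hpre, hlen⟩
    exact hmax ⟨q, hq, hlen, hpre⟩

lemma pvMaximal_empty_iff (patterns : List String) :
    maximalSet patterns = [] ↔ ¬∃ p ∈ patterns, p.toList ≠ [] := by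
  constructor
  · intro h
    rintro ⟨p, hp, hne⟩
    -- build a maximal pattern extending p: the longest extension of p in patterns
    set E := patterns.filter (fun q => p.toList.isPrefixOf q.toList) with hE
    have hpE : p ∈ E := by
      rw [hE, List.mem_filter]
      exact ⟨hp, by rw [List.isPrefixOf_iff_prefix]⟩
    obtain ⟨m, hm⟩ : ∃ m, E.argmax (fun q => q.toList.length) = some m := by
      cases hh : E.argmax (fun q => q.toList.length)
      · exact absurd (List.argmax_eq_none.mp hh) (List.ne_nil_of_mem hpE)
      · exact ⟨_, rfl⟩
    have hmE : m ∈ E := List.argmax_mem hm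
    have hmmax : ∀ a ∈ E, ¬ m.toList.length < a.toList.length := fun a ha =>
      List.not_lt_of_mem_argmax (f := fun q => q.toList.length) ha hm
    rw [hE, List.mem_filter, List.isPrefixOf_iff_prefix] at hmE
    obtain ⟨hmpat, hpm⟩ := hmE
    have hmM : m.toList ∈ maximalSet patterns := by
      rw [pvMaximal_mem]
      refine ⟨⟨m, hmpat, rfl⟩, ?_, ?_⟩
      · intro hnil
        rw [hnil] at hpm
        exact hne (List.prefix_nil.mp hpm)
      · rintro ⟨q, hq, hlen, hpre⟩
        have hqE : q ∈ E := by
          rw [hE, List.mem_filter, List.isPrefixOf_iff_prefix]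
          exact ⟨hq, hpm.trans hpre⟩
        exact hmmax q hqE hlen
    rw [h] at hmM
    simp at hmM
  · intro h
    rw [maximalSet]
    have : (patterns.filter (fun p =>
        !p.toList.isEmpty && !(PySem.Set.contains (properPrefixes patterns) p.toList))) = [] := by
      rw [List.filter_eq_nil_iff]
      intro p hp
      have : p.toList = [] := by
        by_contra hc
        exact h ⟨p, hp, hc⟩
      simp [this]
    rw [this]
    rfl

lemma pvLeaf_no_nonempty (patterns : List String) (u : List Char)
    (hne : ¬∃ p ∈ patterns, p.toList ≠ []) :
    PvIsLeafStr (buildTrie patterns) u ↔ u = [] := by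
  have hchar := (pvBuild_spec patterns).2
  have hR : ∀ v, PvReached (buildTrie patterns) v ↔ v = [] := by
    intro v
    rw [hchar v]
    constructor
    · rintro (h | ⟨p, hp, hpre⟩)
      · exact h
      · have : p.toList = [] := by
          by_contra hc; exact hne ⟨p, hp, hc⟩
        rw [this] at hpre
        exact List.prefix_nil.mp hpre
    · exact Or.inl
  constructor
  · rintro ⟨h1, -⟩
    exact (hR u).mp h1
  · rintro rfl
    refine ⟨(hR []).mpr rfl, ?_⟩
    intro c hc
    have := (hR _).mp hc
    simp at this

lemma pvLeaf_nonempty (patterns : List String) (u : List Char)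
    (hne : ∃ p ∈ patterns, p.toList ≠ []) :
    PvIsLeafStr (buildTrie patterns) u ↔ u ∈ maximalSet patterns := by
  have hchar := (pvBuild_spec patterns).2
  obtain ⟨p0, hp0, hp0ne⟩ := hne
  have hune : ∀ hnoext : (∀ c, ¬ PvReached (buildTrie patterns) (u ++ [c])), u ≠ [] := by
    intro hnoext hnil
    subst hnil
    obtain ⟨c, r, hcr⟩ : ∃ c r, p0.toList = c :: r := by
      cases hh : p0.toList
      · exact absurd hh hp0ne
      · exact ⟨_, _, rfl⟩
    refine hnoext c ?_
    rw [hchar]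
    exact Or.inr ⟨p0, hp0, by rw [hcr]; exact ⟨r, rfl⟩⟩
  rw [pvMaximal_mem]
  constructor
  · rintro ⟨hRu, hnoext⟩
    have hu : u ≠ [] := hune hnoext
    rw [hchar] at hRu
    rcases hRu with rfl | ⟨p, hp, hpre⟩
    · exact absurd rfl hu
    · have hup : u = p.toList := by
        by_contra hc
        obtain ⟨x, hx⟩ := hpre
        cases x with
        | nil => exact hc (by rw [← hx]; simp)
        | cons c r =>
            refine hnoext c ?_
            rw [hchar]
            exact Or.inr ⟨p, hp, by rw [← hx]; exact ⟨r, by simp⟩⟩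
      refine ⟨⟨p, hp, hup.symm⟩, hu, ?_⟩
      rintro ⟨q, hq, hlen, hqpre⟩
      obtain ⟨x, hx⟩ := hqpre
      cases x with
      | nil =>
          rw [List.append_nil] at hx
          rw [hx] at hlen
          omega
      | cons c r =>
          refine hnoext c ?_
          rw [hchar]
          refine Or.inr ⟨q, hq, ?_⟩
          rw [← hx]
          exact ⟨r, by simp⟩
  · rintro ⟨⟨p, hp, rfl⟩, hpne, hpmax⟩
    refine ⟨?_, ?_⟩
    · rw [hchar]
      exact Or.inr ⟨p, hp, List.prefix_refl _⟩
    · intro c hc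
      rw [hchar] at hc
      rcases hc with h | ⟨q, hq, hqpre⟩
      · simp at h
      · refine hpmax ⟨q, hq, ?_, (List.prefix_append _ _).trans hqpre⟩
        have := hqpre.length_le
        simp only [List.length_append, List.length_cons, List.length_nil] at this
        omega

lemma pvMatch_iff (patterns : List String) (cs : List Char) :
    (walkA (buildTrie patterns) 0 cs = true) ↔
      (maximalSet patterns = [] ∨
        ∃ u ∈ maximalSet patterns, u <+: cs) := by
  obtain ⟨⟨cnt, hI⟩, hchar⟩ := pvBuild_spec patterns
  have hwalk := pvWalk_spec (buildTrie patterns) cnt hI cs [] 0 (pvReach_nil _)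
  simp only [List.nil_append] at hwalk
  rw [hwalk]
  by_cases hne : ∃ p ∈ patterns, p.toList ≠ []
  · have hM : maximalSet patterns ≠ [] := by
      intro h
      exact absurd hne ((pvMaximal_empty_iff patterns).mp h)
    constructor
    · rintro ⟨k, hk, hleaf⟩
      rw [pvLeaf_nonempty patterns _ hne] at hleaf
      exact Or.inr ⟨_, hleaf, List.take_prefix k cs⟩
    · rintro (h | ⟨u, huM, hpre⟩)
      · exact absurd h hM
      · refine ⟨u.length, hpre.length_le, ?_⟩
        rw [pvLeaf_nonempty patterns _ hne, ← List.prefix_iff_eq_take.mp hpre]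
        exact huM
  · have hM : maximalSet patterns = [] := (pvMaximal_empty_iff patterns).mpr hne
    constructor
    · intro _; exact Or.inl hM
    · intro _
      refine ⟨0, by omega, ?_⟩
      rw [List.take_zero, pvLeaf_no_nonempty patterns _ hne]

-- ===== VERDICT (by name: the statement is the Claim_ definition above) =====
theorem solve_spec : Claim_equal_solve := by
  unfold Claim_equal_solve Spec_solve
  intro text patterns _hdom
  simp only [solve, solve_alt]
  rw [show (List.foldl
      (fun result i =>
        if walkA (buildTrie patterns) 0 (List.drop i.toNat text.toList) = true then result ++ [i] else result)
      [] (PySem.List.pyRange 0 (PySem.Str.len text) 1)) =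
      [] ++ List.filter (fun i => walkA (buildTrie patterns) 0 (List.drop i.toNat text.toList))
        (PySem.List.pyRange 0 (PySem.Str.len text) 1) from
    PySem.List.foldl_append_if_eq_filter _ _ _]
  rw [List.nil_append]
  by_cases hM : maximalSet patterns = []
  · rw [if_pos (by rw [hM]; rfl)]
    apply List.filter_eq_self.mpr
    intro i _
    rw [pvMatch_iff]
    exact Or.inl hM
  · rw [if_neg (by simpa [List.isEmpty_iff] using hM)]
    have hmapne : (maximalSet patterns).map (fun u => (u.length : Int)) ≠ [] := by
      simpa using hM
    obtain ⟨maxlen, hmax⟩ : ∃ m, PySem.List.max?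
        ((maximalSet patterns).map (fun u => (u.length : Int))) (fun x => x) = some m := by
      cases hh : PySem.List.max? ((maximalSet patterns).map (fun u => (u.length : Int))) (fun x => x)
      · exact absurd ((PySem.List.max?_eq_none_iff _ _).mp hh) hmapne
      · exact ⟨_, rfl⟩
    rw [hmax]
    apply List.filter_congr
    intro i _
    rw [Bool.eq_iff_iff]
    rw [pvMatch_iff]
    constructor
    · rintro (h | ⟨u, huM, hpre⟩)
      · exact absurd h hM
      · rw [List.any_eq_true]
        have hu_ne : u ≠ [] := ((pvMaximal_mem patterns u).mp huM).2.1
        have hu_le : (u.length : Int) ≤ maxlen :=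
          PySem.List.max?_isMax hmax _ (List.mem_map_of_mem huM)
        refine ⟨(u.length : Int), ?_, ?_⟩
        · rw [PySem.List.mem_pyRange_one]
          constructor
          · have : 0 < u.length := List.length_pos_iff.mpr hu_ne
            omega
          · omega
        · rw [PySem.Set.contains_iff, Int.toNat_natCast, ← List.prefix_iff_eq_take.mp hpre]
          exact huM
    · intro h
      rw [List.any_eq_true] at h
      obtain ⟨l, -, hcont⟩ := h
      rw [PySem.Set.contains_iff] at hcont
      exact Or.inr ⟨_, hcont, List.take_prefix _ _⟩
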